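-- pv_equiv track=rewrite | github.com/ext-maru/ai-co | elders_guild/libs/pgvector_simple_reconstruction.py | get_file_priority
-- ===== SOURCE A (Python) =====
-- def get_file_priority(filepath: str) -> int:
--     """ファイル優先度判定"""
--     path_str = str(filepath).lower()
--
--     # 超高優先度 - マスター文書
--     if any(x in path_str for x in ['master_kb', 'elder_identity', 'elder_knowledge_minimal']):
--         return 1
--
--     # 高優先度 - コア知識
--     if any(x in path_str for x in ['core/', 'four_sages/', 'protocols/']):
--         return 2
--
--     # 中優先度 - 技術・決定
--     if any(x in path_str for x in ['technical/', 'decisions/', 'guides/']):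
--         return 3
--
--     # 低優先度 - その他
--     return 4
-- ===== SOURCE B (Python) =====
-- _KEYWORD_TIER = {
--     'master_kb': 1, 'elder_identity': 1, 'elder_knowledge_minimal': 1,
--     'core/': 2, 'four_sages/': 2, 'protocols/': 2,
--     'technical/': 3, 'decisions/': 3, 'guides/': 3,
-- }
--
--
-- def get_file_priority(filepath: str) -> int:
--     """ファイル優先度判定: best (minimum) tier over ALL matching keywords, default 4."""
--     path_str = str(filepath).lower()
--     best = 4
--     for keyword, tier in _KEYWORD_TIER.items():
--         if keyword in path_str and tier < best:
--             best = tier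
--     return best
-- ===== Notes on version B (the rewrite author's own statement) =====
-- stated objective: alternative
-- what changed: Instead of three sequential group checks with early returns, B aggregates: it scans one flat keyword->tier map and keeps the minimum tier among all matching keywords (default 4); this is correct because a lower-tier match dominates regardless of which other keywords also match.
import Mathlib
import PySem

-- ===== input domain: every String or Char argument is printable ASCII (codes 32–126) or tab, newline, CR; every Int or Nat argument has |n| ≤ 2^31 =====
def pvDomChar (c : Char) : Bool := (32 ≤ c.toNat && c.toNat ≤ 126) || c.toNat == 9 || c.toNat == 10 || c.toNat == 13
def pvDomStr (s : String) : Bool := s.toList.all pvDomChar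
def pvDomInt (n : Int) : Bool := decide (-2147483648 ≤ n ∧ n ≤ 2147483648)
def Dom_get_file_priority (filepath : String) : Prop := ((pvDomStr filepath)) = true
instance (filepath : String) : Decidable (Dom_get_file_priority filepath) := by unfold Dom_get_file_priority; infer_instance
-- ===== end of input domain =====

-- B replaces A's three early-return group checks by a min-aggregation over one flat keyword->tier map (alternative decomposition; same cost).

-- ===== PORT A =====
def get_file_priority (filepath : String) : Int :=
  let path_str := PySem.Str.lower filepath
  if ["master_kb", "elder_identity", "elder_knowledge_minimal"].any (fun x => PySem.Str.isIn x path_str) then 1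
  else if ["core/", "four_sages/", "protocols/"].any (fun x => PySem.Str.isIn x path_str) then 2
  else if ["technical/", "decisions/", "guides/"].any (fun x => PySem.Str.isIn x path_str) then 3
  else 4

-- ===== PORT B =====
-- B: one flat keyword -> tier map; result = minimum tier among all matching keywords, default 4
def keywordTier : List (String × Int) :=
  [("master_kb", 1), ("elder_identity", 1), ("elder_knowledge_minimal", 1),
   ("core/", 2), ("four_sages/", 2), ("protocols/", 2),
   ("technical/", 3), ("decisions/", 3), ("guides/", 3)]

def get_file_priority_alt (filepath : String) : Int :=
  let path_str := PySem.Str.lower filepath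
  keywordTier.foldl
    (fun best kt => if PySem.Str.isIn kt.1 path_str ∧ kt.2 < best then kt.2 else best) 4

-- ===== PRECONDITION & SPEC =====
def Spec_get_file_priority (filepath : String) (out : Int) : Prop := out = get_file_priority_alt filepath
instance (filepath : String) (out : Int) : Decidable (Spec_get_file_priority filepath out) := by unfold Spec_get_file_priority; infer_instance

-- ===== CLAIM (what is proved, stated in full; the proofs are below) =====
def Claim_equal_get_file_priority : Prop := ∀ (filepath : String), Dom_get_file_priority filepath → Spec_get_file_priority filepath (get_file_priority filepath)

-- ===== LEMMAS AND PROOFS =====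

-- ===== VERDICT (by name: the statement is the Claim_ definition above) =====
-- bridge: the boolean skeleton shared by both ports, checked over all 2^9 cases
theorem pv_bool_skeleton : ∀ (b0 b1 b2 b3 b4 b5 b6 b7 b8 : Bool),
    List.foldl (fun (best : Int) (kt : Bool × Int) => if kt.1 = true ∧ kt.2 < best then kt.2 else best) 4
      [(b0, 1), (b1, 1), (b2, 1), (b3, 2), (b4, 2), (b5, 2), (b6, 3), (b7, 3), (b8, 3)]
    = (if (b0 || (b1 || b2)) = true then 1
       else if (b3 || (b4 || b5)) = true then 2
       else if (b6 || (b7 || b8)) = true then 3 else 4) := by decide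

theorem get_file_priority_spec : Claim_equal_get_file_priority := by
  intro f _
  show get_file_priority f = get_file_priority_alt f
  unfold get_file_priority get_file_priority_alt keywordTier
  simp only [List.any_cons, List.any_nil, Bool.or_false]
  rw [show ∀ p, List.foldl
        (fun (best : Int) (kt : String × Int) => if PySem.Str.isIn kt.1 p ∧ kt.2 < best then kt.2 else best) 4
        [("master_kb", 1), ("elder_identity", 1), ("elder_knowledge_minimal", 1),
         ("core/", 2), ("four_sages/", 2), ("protocols/", 2),
         ("technical/", 3), ("decisions/", 3), ("guides/", 3)]
      = List.foldl
        (fun (best : Int) (kt : Bool × Int) => if kt.1 = true ∧ kt.2 < best then kt.2 else best) 4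
        [(PySem.Str.isIn "master_kb" p, 1), (PySem.Str.isIn "elder_identity" p, 1),
         (PySem.Str.isIn "elder_knowledge_minimal" p, 1), (PySem.Str.isIn "core/" p, 2),
         (PySem.Str.isIn "four_sages/" p, 2), (PySem.Str.isIn "protocols/" p, 2),
         (PySem.Str.isIn "technical/" p, 3), (PySem.Str.isIn "decisions/" p, 3),
         (PySem.Str.isIn "guides/" p, 3)]
      from fun p => rfl]
  rw [pv_bool_skeleton]
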